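-- pv_equiv track=rewrite | github.com/mattzh72/minecraftlm | backend/app/agent/minecraft/terrain/terrain.py | _iter_layers_with_offsets
-- ===== SOURCE A (Python) =====
-- from typing import Any, Dict, List, Optional, Tuple
--
-- FILL_TO_BOTTOM_DEPTH = 999
--
-- def _iter_layers_with_offsets(
--     layers: List[Tuple[str, int, Dict[str, str]]],
-- ) -> List[Tuple[str, int, Dict[str, str], int]]:
--     offset = 0
--     with_offsets: List[Tuple[str, int, Dict[str, str], int]] = []
--     for block_id, depth, properties in layers:
--         with_offsets.append((block_id, depth, properties, offset))
--         if depth < FILL_TO_BOTTOM_DEPTH: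
--             offset += depth
--     return with_offsets
-- ===== SOURCE B (Python) =====
-- from typing import Dict, List, Tuple
--
-- FILL_TO_BOTTOM_DEPTH = 999
--
-- def _iter_layers_with_offsets(
--     layers: List[Tuple[str, int, Dict[str, str]]],
-- ) -> List[Tuple[str, int, Dict[str, str], int]]:
--     # No running accumulator: each layer's offset is computed independently
--     # as the total of the contributing depths strictly before it.
--     return [
--         (b, d, p, sum(dd for _, dd, _ in layers[:i] if dd < FILL_TO_BOTTOM_DEPTH))
--         for i, (b, d, p) in enumerate(layers)
--     ]
-- ===== Notes on version B (the rewrite author's own statement) =====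
-- stated objective: alternative
-- what changed: B drops the running accumulator entirely: each layer's offset is recomputed independently as the sum of the contributing depths in its prefix layers[:i].
import Mathlib
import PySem

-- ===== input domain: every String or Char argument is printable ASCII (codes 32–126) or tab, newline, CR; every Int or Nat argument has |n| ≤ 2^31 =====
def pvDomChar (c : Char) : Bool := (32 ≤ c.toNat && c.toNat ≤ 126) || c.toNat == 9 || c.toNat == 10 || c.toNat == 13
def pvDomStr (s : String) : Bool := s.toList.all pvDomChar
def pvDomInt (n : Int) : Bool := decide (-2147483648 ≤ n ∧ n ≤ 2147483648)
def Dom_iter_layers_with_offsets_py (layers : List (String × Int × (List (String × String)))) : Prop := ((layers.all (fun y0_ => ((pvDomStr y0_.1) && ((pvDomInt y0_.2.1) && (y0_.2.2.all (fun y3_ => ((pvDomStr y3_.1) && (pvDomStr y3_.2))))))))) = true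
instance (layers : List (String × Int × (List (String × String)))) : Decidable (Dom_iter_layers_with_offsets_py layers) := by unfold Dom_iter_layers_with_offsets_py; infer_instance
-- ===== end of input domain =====

-- B drops A's running accumulator: each layer's offset is computed independently as the sum of contributing depths in its prefix layers[:i]. Objective: alternative decomposition, same return value.
-- ===== PORT A =====
-- A's for-loop with the running `offset`, as the obvious structural recursion over the layers.
def pvALoop (layers : List (String × Int × (List (String × String)))) (offset : Int) : List (String × Int × (List (String × String)) × Int) :=
  match layers with
  | [] => []
  | (b, d, p) :: rest =>
      (b, d, p, offset) :: pvALoop rest (if d < 999 then offset + d else offset)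

def iter_layers_with_offsets_py (layers : List (String × Int × (List (String × String)))) : List (String × Int × (List (String × String)) × Int) :=
  pvALoop layers 0

-- ===== PORT B =====
-- Source B's `sum(dd for _, dd, _ in pre if dd < 999)`.
def pvBsum (pre : List (String × Int × (List (String × String)))) : Int :=
  ((pre.filter (fun t => decide (t.2.1 < 999))).map (fun t => t.2.1)).sum

-- Source B's comprehension over enumerate(layers); layers[:i] is the Python slice.
def iter_layers_with_offsets_py_alt (layers : List (String × Int × (List (String × String)))) : List (String × Int × (List (String × String)) × Int) :=
  (PySem.List.enumerate layers).map
    (fun z => (z.2.1, z.2.2.1, z.2.2.2, pvBsum (PySem.List.slice layers none (some z.1))))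

-- ===== PRECONDITION & SPEC =====
def Spec_iter_layers_with_offsets_py (layers : List (String × Int × (List (String × String)))) (out : List (String × Int × (List (String × String)) × Int)) : Prop := out = iter_layers_with_offsets_py_alt layers
instance (layers : List (String × Int × (List (String × String)))) (out : List (String × Int × (List (String × String)) × Int)) : Decidable (Spec_iter_layers_with_offsets_py layers out) := by unfold Spec_iter_layers_with_offsets_py; infer_instance

-- ===== CLAIM =====
def Claim_equal_iter_layers_with_offsets_py : Prop := ∀ (layers : List (String × Int × (List (String × String)))), Dom_iter_layers_with_offsets_py layers → Spec_iter_layers_with_offsets_py layers (iter_layers_with_offsets_py layers)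

-- ===== LEMMAS AND PROOFS =====

theorem pvBsum_append (xs ys : List (String × Int × (List (String × String)))) :
    pvBsum (xs ++ ys) = pvBsum xs + pvBsum ys := by
  simp [pvBsum]

-- Generalized invariant: A's loop started at offset s equals B's per-index sums shifted by s,
-- over enumerate starting at (k : Nat) when the prefixes are taken from a larger list `all`
-- whose first k + |xs| elements end with xs.  We instead use a direct formulation:
theorem pvALoop_eq (all xs : List (String × Int × (List (String × String)))) (k : Nat)
    (hpre : ∀ n : Nat, all.take (k + n) = all.take k ++ xs.take n) :
    pvALoop xs (pvBsum (all.take k)) =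
      (PySem.List.enumerate xs (k : Int)).map
        (fun z => (z.2.1, z.2.2.1, z.2.2.2, pvBsum (PySem.List.slice all none (some z.1)))) := by
  induction xs generalizing k with
  | nil => simp [pvALoop, PySem.List.enumerate_nil]
  | cons hd tl ih =>
      obtain ⟨b, d, p⟩ := hd
      rw [PySem.List.enumerate_cons]
      simp only [List.map_cons, pvALoop]
      have htake : PySem.List.slice all none (some (k : Int)) = all.take k :=
        PySem.List.slice_to_natCast all k
      refine congrArg₂ List.cons (by simp [htake]) ?_
      have hstep : pvBsum (all.take (k + 1)) =
          pvBsum (all.take k) + (if d < 999 then d else 0) := by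
        have h1 := hpre 1
        rw [h1, pvBsum_append]
        by_cases h : d < 999 <;> simp [pvBsum, h]
      have hpre' : ∀ n : Nat, all.take ((k + 1) + n) = all.take (k + 1) ++ tl.take n := by
        intro n
        have h1 := hpre 1
        have hn := hpre (1 + n)
        rw [show (k + 1) + n = k + (1 + n) by omega, hn, h1, show 1 + n = n + 1 from Nat.add_comm 1 n]
        simp [List.take_succ_cons]
      have := ih (k + 1) hpre'
      rw [hstep] at this
      have hoff : (if d < 999 then pvBsum (all.take k) + d else pvBsum (all.take k)) =
          pvBsum (all.take k) + (if d < 999 then d else 0) := by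
        by_cases h : d < 999 <;> simp [h]
      rw [hoff, this]
      norm_num

-- ===== VERDICT =====
theorem iter_layers_with_offsets_py_spec : Claim_equal_iter_layers_with_offsets_py := by
  intro layers _
  show iter_layers_with_offsets_py layers = iter_layers_with_offsets_py_alt layers
  have h := pvALoop_eq layers layers 0 (by intro n; simp)
  simpa [iter_layers_with_offsets_py, iter_layers_with_offsets_py_alt, pvBsum] using h
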